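-- pv_equiv track=rewrite | github.com/logxdx/deadly_python | COL100/QUIZ1/q1.py | F
-- ===== SOURCE A (Python) =====
-- def F(x):
--     s=len(str(x))
--     if x==0:
--         return 0
--     if x<10:
--         return x
--     elif s%2==1:
--         prod=1
--         temp=x
--         while temp>0:
--             d=temp%10
--             prod*=d
--             temp//=+10
--         return F(prod)
--     else:
--         sum=0
--         temp=x
--         while temp>0:
--             d=temp%10
--             sum+=d
--             temp//=10
--         return F(sum)
-- ===== SOURCE B (Python) =====
-- def F(x):
--     # Iterative reduction; digits are taken from the decimal string instead of a modulo loop.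
--     while x >= 10:
--         digits = [ord(c) - 48 for c in str(x)]
--         if len(digits) % 2 == 1:
--             p = 1
--             for d in digits:
--                 p *= d
--             x = p
--         else:
--             x = sum(digits)
--     return x
-- ===== Notes on version B (the rewrite author's own statement) =====
-- stated objective: simpler
-- what changed: Replaced A's tail recursion with an iterative while-loop and replaced A's two modulo/floor-division digit-extraction loops with a single digit list read off str(x).
import Mathlib
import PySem

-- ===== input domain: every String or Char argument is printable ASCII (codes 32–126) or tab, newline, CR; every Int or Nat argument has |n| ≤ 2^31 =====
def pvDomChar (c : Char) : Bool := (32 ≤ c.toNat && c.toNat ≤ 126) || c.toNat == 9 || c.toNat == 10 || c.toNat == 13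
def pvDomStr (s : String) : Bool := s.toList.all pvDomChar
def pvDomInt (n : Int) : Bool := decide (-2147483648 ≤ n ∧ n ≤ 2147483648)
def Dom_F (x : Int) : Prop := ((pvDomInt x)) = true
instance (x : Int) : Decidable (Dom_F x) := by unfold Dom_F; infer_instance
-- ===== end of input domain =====

-- B replaces A's tail recursion with an iterative loop and swaps the modulo digit-extraction
-- loops for digit iteration over str(x) (objective: simpler).
-- Fuel arguments are totality guards only: each reduction step strictly decreases the value
-- (proved below), so the supplied fuel is never exhausted.

-- ===== PORT A =====
-- while temp>0: d=temp%10; prod*=d; temp//=10   (fuel ≥ temp suffices: temp strictly decreases)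
def prodLoopA : Nat → Int → Int → Int
  | 0, prod, _ => prod
  | fuel + 1, prod, temp =>
    if 0 < temp then
      prodLoopA fuel (prod * PySem.Int.mod temp 10) (PySem.Int.floordiv temp 10)
    else prod

-- while temp>0: d=temp%10; sum+=d; temp//=10
def sumLoopA : Nat → Int → Int → Int
  | 0, sum, _ => sum
  | fuel + 1, sum, temp =>
    if 0 < temp then
      sumLoopA fuel (sum + PySem.Int.mod temp 10) (PySem.Int.floordiv temp 10)
    else sum

def FAux : Nat → Int → Int
  | 0, x => x
  | fuel + 1, x =>
    let s := PySem.Str.len (PySem.Int.toStr x)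
    if x = 0 then 0
    else if x < 10 then x
    else if PySem.Int.mod s 2 = 1 then FAux fuel (prodLoopA x.toNat 1 x)
    else FAux fuel (sumLoopA x.toNat 0 x)

def F (x : Int) : Int := FAux (x.toNat + 1) x

-- ===== PORT B =====
def FAltAux : Nat → Int → Int
  | 0, x => x
  | fuel + 1, x =>
    if 10 ≤ x then
      -- ord(c) - 48 for each character of str(x); exact for the digit characters str(x) produces
      let digits := (PySem.Int.toStr x).toList.map (fun c => ((c.toNat : Int) - 48))
      let x' := if PySem.Int.mod (PySem.List.len digits) 2 = 1
                then digits.foldl (· * ·) 1 else digits.sum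
      FAltAux fuel x'
    else x

def F_alt (x : Int) : Int := FAltAux (x.toNat + 1) x

-- ===== PRECONDITION & SPEC =====
def Spec_F (x : Int) (out : Int) : Prop := out = F_alt x
instance (x : Int) (out : Int) : Decidable (Spec_F x out) := by unfold Spec_F; infer_instance

-- ===== CLAIM (what is proved, stated in full; the proofs are below) =====
def Claim_equal_F : Prop := ∀ (x : Int), Dom_F x → Spec_F x (F x)

-- ===== LEMMAS AND PROOFS =====

-- Reference digit functions (proof-side only).
def prodDN (n : Nat) : Nat :=
  if n = 0 then 1 else (n % 10) * prodDN (n / 10)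
termination_by n
decreasing_by omega

def sumDN (n : Nat) : Nat :=
  if n = 0 then 0 else (n % 10) + sumDN (n / 10)
termination_by n
decreasing_by omega

theorem prodDN_step (n : Nat) (h : n ≠ 0) : prodDN n = (n % 10) * prodDN (n / 10) := by
  rw [prodDN, if_neg h]

theorem prodDN_zero : prodDN 0 = 1 := by rw [prodDN]; rfl

theorem sumDN_step (n : Nat) (h : n ≠ 0) : sumDN n = (n % 10) + sumDN (n / 10) := by
  rw [sumDN, if_neg h]

theorem sumDN_zero : sumDN 0 = 0 := by rw [sumDN]; rfl

theorem prodDN_small (n : Nat) (h0 : 0 < n) (h : n < 10) : prodDN n = n := by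
  rw [prodDN_step n (by omega), show n / 10 = 0 by omega, prodDN_zero]
  omega

theorem sumDN_small (n : Nat) (h : n < 10) : sumDN n = n := by
  by_cases h0 : n = 0
  · rw [h0, sumDN_zero]
  · rw [sumDN_step n h0, show n / 10 = 0 by omega, sumDN_zero]
    omega

theorem prodDN_le : ∀ n : Nat, 1 ≤ n → prodDN n ≤ n := by
  intro n
  induction n using Nat.strong_induction_on with
  | _ n ih =>
    intro h1
    rw [prodDN_step n (by omega)]
    by_cases h : n < 10
    · rw [show n / 10 = 0 by omega, prodDN_zero]
      omega
    · calc (n % 10) * prodDN (n / 10) ≤ 9 * (n / 10) :=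
            Nat.mul_le_mul (by omega) (ih (n / 10) (by omega) (by omega))
        _ ≤ n := by omega

theorem prodDN_lt (n : Nat) (h : 10 ≤ n) : prodDN n < n := by
  rw [prodDN_step n (by omega)]
  calc (n % 10) * prodDN (n / 10) ≤ 9 * (n / 10) :=
        Nat.mul_le_mul (by omega) (prodDN_le (n / 10) (by omega))
    _ < n := by omega

theorem sumDN_le : ∀ n : Nat, sumDN n ≤ n := by
  intro n
  induction n using Nat.strong_induction_on with
  | _ n ih =>
    by_cases h : n = 0
    · rw [h, sumDN_zero]
    · rw [sumDN_step n h]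
      have := ih (n / 10) (by omega)
      omega

theorem sumDN_lt (n : Nat) (h : 10 ≤ n) : sumDN n < n := by
  rw [sumDN_step n (by omega)]
  have := sumDN_le (n / 10)
  omega

theorem prodLoopA_eq : ∀ (fuel : Nat) (p t : Int), 0 ≤ t → t.toNat ≤ fuel →
    prodLoopA fuel p t = p * (prodDN t.toNat : Int) := by
  intro fuel
  induction fuel with
  | zero =>
    intro p t ht hf
    rw [show t = 0 by omega]
    rw [prodLoopA, show (0 : Int).toNat = 0 from rfl, prodDN_zero]
    simp
  | succ fuel ih =>
    intro p t ht hf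
    rw [prodLoopA]
    by_cases h : 0 < t
    · rw [if_pos h,
        PySem.Int.mod_eq_emod_of_pos (a := t) (by norm_num),
        PySem.Int.floordiv_eq_ediv_of_pos (a := t) (by norm_num),
        ih _ _ (by omega) (by omega),
        prodDN_step t.toNat (by omega)]
      have e1 : (t / 10).toNat = t.toNat / 10 := by omega
      have e2 : t % 10 = ((t.toNat % 10 : Nat) : Int) := by omega
      rw [e1, e2]
      push_cast
      ring
    · rw [if_neg h, show t.toNat = 0 by omega, prodDN_zero]
      simp

theorem sumLoopA_eq : ∀ (fuel : Nat) (s t : Int), 0 ≤ t → t.toNat ≤ fuel →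
    sumLoopA fuel s t = s + (sumDN t.toNat : Int) := by
  intro fuel
  induction fuel with
  | zero =>
    intro s t ht hf
    rw [show t = 0 by omega]
    rw [sumLoopA, show (0 : Int).toNat = 0 from rfl, sumDN_zero]
    simp
  | succ fuel ih =>
    intro s t ht hf
    rw [sumLoopA]
    by_cases h : 0 < t
    · rw [if_pos h,
        PySem.Int.mod_eq_emod_of_pos (a := t) (by norm_num),
        PySem.Int.floordiv_eq_ediv_of_pos (a := t) (by norm_num),
        ih _ _ (by omega) (by omega),
        sumDN_step t.toNat (by omega)]
      have e1 : (t / 10).toNat = t.toNat / 10 := by omega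
      have e2 : t % 10 = ((t.toNat % 10 : Nat) : Int) := by omega
      rw [e1, e2]
      push_cast
      ring
    · rw [if_neg h, show t.toNat = 0 by omega, sumDN_zero]
      simp

-- Most-significant-first decimal digit characters of n; equals Nat.toDigits 10 n (tdc_eq).
def digs (n : Nat) : List Char :=
  if n < 10 then [Nat.digitChar n]
  else digs (n / 10) ++ [Nat.digitChar (n % 10)]
termination_by n
decreasing_by omega

theorem digs_base (n : Nat) (h : n < 10) : digs n = [Nat.digitChar n] := by
  rw [digs, if_pos h]

theorem digs_step (n : Nat) (h : ¬ n < 10) :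
    digs n = digs (n / 10) ++ [Nat.digitChar (n % 10)] := by
  conv_lhs => rw [digs]
  rw [if_neg h]

theorem digitChar_val (d : Nat) (hd : d < 10) : ((Nat.digitChar d).toNat : Int) - 48 = d := by
  interval_cases d <;> rfl

theorem digs_sum : ∀ n : Nat,
    ((digs n).map (fun c => ((c.toNat : Int) - 48))).sum = (sumDN n : Int) := by
  intro n
  induction n using Nat.strong_induction_on with
  | _ n ih =>
    by_cases h : n < 10
    · rw [digs_base n h, sumDN_small n h]
      simp only [List.map, List.sum_cons, List.sum_nil, add_zero]
      rw [digitChar_val n h]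
    · rw [digs_step n h, List.map_append, List.sum_append, ih (n / 10) (by omega),
        sumDN_step n (by omega)]
      simp [digitChar_val (n % 10) (by omega)]
      ring

theorem digs_prod : ∀ (n : Nat), 0 < n → ∀ (p : Int),
    ((digs n).map (fun c => ((c.toNat : Int) - 48))).foldl (· * ·) p = p * (prodDN n : Int) := by
  intro n
  induction n using Nat.strong_induction_on with
  | _ n ih =>
    intro hn p
    by_cases h : n < 10
    · rw [digs_base n h, prodDN_small n hn h]
      simp only [List.map, List.foldl_cons, List.foldl_nil]
      rw [digitChar_val n h]
    · rw [digs_step n h, List.map_append, List.foldl_append, ih (n / 10) (by omega) (by omega) p,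
        prodDN_step n (by omega)]
      simp [digitChar_val (n % 10) (by omega)]
      ring

theorem tdc_eq : ∀ (f n : Nat) (acc : List Char), n < f →
    Nat.toDigitsCore 10 f n acc = digs n ++ acc := by
  intro f
  induction f with
  | zero => intro n acc h; omega
  | succ f ih =>
    intro n acc h
    rw [Nat.toDigitsCore]
    by_cases h0 : n / 10 = 0
    · rw [if_pos h0, digs_base n (by omega), show n % 10 = n by omega]
      rfl
    · rw [if_neg h0, ih (n / 10) _ (by omega), digs_step n (by omega)]
      simp

theorem toStr_toList (x : Int) (hx : 0 ≤ x) :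
    (PySem.Int.toStr x).toList = digs x.toNat := by
  rw [PySem.Int.toStr, String.toList_ofList, PySem.Int.toChars, if_neg (by omega : ¬ x < 0),
    Nat.toDigits, tdc_eq (x.toNat + 1) x.toNat [] (by omega)]
  simp

theorem FAux_eq_FAltAux : ∀ (fuel : Nat) (x : Int), x.toNat < fuel →
    FAux fuel x = FAltAux fuel x := by
  intro fuel
  induction fuel with
  | zero => intro x h; omega
  | succ fuel ih =>
    intro x hf
    rw [FAux, FAltAux]
    by_cases hx : x < 10
    · rw [if_neg (by omega : ¬ 10 ≤ x)]
      by_cases h0 : x = 0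
      · rw [if_pos h0, h0]
      · rw [if_neg h0, if_pos hx]
    · rw [if_neg (by omega : ¬ x = 0), if_neg hx, if_pos (by omega : 10 ≤ x)]
      simp only []
      have htl : (PySem.Int.toStr x).toList = digs x.toNat := toStr_toList x (by omega)
      have hlen : PySem.Str.len (PySem.Int.toStr x)
          = PySem.List.len ((PySem.Int.toStr x).toList.map (fun c => ((c.toNat : Int) - 48))) := by
        simp [PySem.Str.len, PySem.List.len]
      rw [hlen]
      split
      · rw [prodLoopA_eq x.toNat 1 x (by omega) (by omega), htl,
          digs_prod x.toNat (by omega) 1, one_mul]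
        have hlt := prodDN_lt x.toNat (by omega)
        exact ih _ (by omega)
      · rw [sumLoopA_eq x.toNat 0 x (by omega) (by omega), htl, digs_sum x.toNat, zero_add]
        have hlt := sumDN_lt x.toNat (by omega)
        exact ih _ (by omega)

-- ===== VERDICT (by name: the statement is the Claim_ definition above) =====
theorem F_spec : Claim_equal_F := by
  intro x _
  unfold Spec_F F F_alt
  exact FAux_eq_FAltAux (x.toNat + 1) x (by omega)
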